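-- pv_equiv track=rewrite | github.com/jianlin-cheng/DeepComplex | libs/scripts/farhan_homodimer_scripts/sequenceAlign_test.py | selectBestAlignment
-- ===== SOURCE A (Python) =====
-- def getMaxConsecutiveGaps(sequence):
--     num_of_gap_sequence=0
--     if ("-" in sequence):
--         gap_found=False
--         i=-1
--         while i < len(sequence)-1:
--             i+=1
--             if (sequence[i]=="-"):
--                 gap_found=True
--                 for j in range(i,len(sequence)):
--
--                     if (sequence[j]!="-"):
--                         num_of_gap_sequence+=1
--                         i=j-1
--                         break
--         #pass
--     else:
--         return 0
--
--     return num_of_gap_sequence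
--
-- def selectBestAlignment(alignment):
--     best=getMaxConsecutiveGaps(alignment[0][0])+getMaxConsecutiveGaps(alignment[0][1])
--     best_aln=alignment[0]
--     for i in range(1,len(alignment)):
--         score_a1=getMaxConsecutiveGaps(alignment[i][0])
--         score_a2=getMaxConsecutiveGaps(alignment[i][1])
--         #print (score_a1,score_a2)
--         if (score_a1+score_a2<=best):
--             best=score_a1+score_a2
--             best_aln=alignment[i]
--
--     return best_aln
-- ===== SOURCE B (Python) =====
-- def getMaxConsecutiveGaps(sequence):
--     return sum(1 for a, b in zip(sequence, sequence[1:]) if a == "-" and b != "-")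
--
-- def selectBestAlignment(alignment):
--     scores = [getMaxConsecutiveGaps(a) + getMaxConsecutiveGaps(b) for a, b in alignment]
--     best_i = 0
--     for i in range(1, len(scores)):
--         if scores[i] <= scores[best_i]:
--             best_i = i
--     return alignment[best_i]
-- ===== Notes on version B (the rewrite author's own statement) =====
-- stated objective: simpler
-- what changed: getMaxConsecutiveGaps becomes a flat single pass counting gap-to-non-gap boundary transitions over adjacent character pairs (no nested forward-jumping loop or membership guard), and selectBestAlignment precomputes all scores into a list and then picks the last index attaining the minimal score.
import Mathlib
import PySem

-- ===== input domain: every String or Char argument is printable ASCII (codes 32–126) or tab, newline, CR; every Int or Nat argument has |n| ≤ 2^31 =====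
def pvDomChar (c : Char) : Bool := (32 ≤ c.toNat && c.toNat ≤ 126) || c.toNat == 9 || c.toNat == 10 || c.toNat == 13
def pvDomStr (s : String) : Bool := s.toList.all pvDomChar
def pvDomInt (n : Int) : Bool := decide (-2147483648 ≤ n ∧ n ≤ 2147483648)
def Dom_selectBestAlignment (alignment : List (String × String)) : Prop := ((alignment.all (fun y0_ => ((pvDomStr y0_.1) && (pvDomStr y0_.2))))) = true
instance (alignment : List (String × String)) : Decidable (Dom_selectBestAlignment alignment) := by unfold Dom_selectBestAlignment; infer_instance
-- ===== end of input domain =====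

-- B simplifies getMaxConsecutiveGaps to a flat pass counting gap→non-gap adjacent transitions and
-- selects via a precomputed score list (last minimal index); return value proved equal on nonempty input.

-- ===== PORT A =====
-- inner `for j in range(i, len(sequence))`: first index j ≥ i with s[j] ≠ '-' (the break), else none
def gapsInnerA (s : List Char) (j : Nat) : Option Nat :=
  if h : j < s.length then
    if s[j] ≠ '-' then some j else gapsInnerA s (j + 1)
  else none
termination_by s.length - j

-- outer `while i < len(sequence)-1` loop; the index here is the value just after the `i+=1`
-- at the top of the Python loop (so `i=j-1` followed by `i+=1` becomes recursing with j).
-- `fuel = s.length` bounds the iteration count (the index starts at 0 and strictly increases).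
def gapsLoopA (s : List Char) (i cnt fuel : Nat) : Nat :=
  match fuel with
  | 0 => cnt
  | f + 1 =>
    if h : i < s.length then
      if s[i] = '-' then
        match gapsInnerA s i with
        | some j => gapsLoopA s j (cnt + 1) f
        | none => gapsLoopA s (i + 1) cnt f
      else gapsLoopA s (i + 1) cnt f
    else cnt

def getMaxConsecutiveGapsA (sequence : String) : Nat :=
  if '-' ∈ sequence.toList then gapsLoopA sequence.toList 0 0 sequence.toList.length
  else 0

def selectBestAlignment (alignment : List (String × String)) : String × String :=
  match alignment with
  | [] => ("", "")  -- Python raises IndexError on []; excluded by Pre_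
  | h :: t =>
    (t.foldl
      (fun (acc : Nat × (String × String)) p =>
        let score := getMaxConsecutiveGapsA p.1 + getMaxConsecutiveGapsA p.2
        if score ≤ acc.1 then (score, p) else acc)
      (getMaxConsecutiveGapsA h.1 + getMaxConsecutiveGapsA h.2, h)).2

-- ===== PORT B =====
-- `sum(1 for a, b in zip(sequence, sequence[1:]) if a == "-" and b != "-")`
def getMaxConsecutiveGapsB (sequence : String) : Nat :=
  (sequence.toList.zip sequence.toList.tail).countP (fun p => p.1 == '-' && p.2 != '-')

def selectBestAlignment_alt (alignment : List (String × String)) : String × String :=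
  let scores := alignment.map (fun p => getMaxConsecutiveGapsB p.1 + getMaxConsecutiveGapsB p.2)
  let besti := (List.range' 1 (scores.length - 1)).foldl
      (fun b i => if scores.getD i 0 ≤ scores.getD b 0 then i else b) 0
  alignment.getD besti ("", "")

-- ===== PRECONDITION & SPEC =====
-- Python A indexes alignment[0], raising IndexError on the empty list; Pre_ excludes exactly that.
def Pre_selectBestAlignment (alignment : List (String × String)) : Prop := alignment ≠ []
instance (alignment : List (String × String)) : Decidable (Pre_selectBestAlignment alignment) := by
  unfold Pre_selectBestAlignment; infer_instance
def pvWitness_selectBestAlignment : (List (String × String)) := [("a--b-", "--ab")]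

def Spec_selectBestAlignment (alignment : List (String × String)) (out : String × String) : Prop := out = selectBestAlignment_alt alignment
instance (alignment : List (String × String)) (out : String × String) : Decidable (Spec_selectBestAlignment alignment out) := by unfold Spec_selectBestAlignment; infer_instance

-- ===== CLAIM (what is proved, stated in full; the proofs are below) =====
def Claim_equal_selectBestAlignment : Prop := ∀ (alignment : List (String × String)), Dom_selectBestAlignment alignment → Pre_selectBestAlignment alignment → Spec_selectBestAlignment alignment (selectBestAlignment alignment)

-- ===== LEMMAS AND PROOFS (helper defs and lemmas) =====

def tcFrom (s : List Char) (i : Nat) : Nat :=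
  ((s.drop i).zip (s.drop i).tail).countP (fun p => p.1 == '-' && p.2 != '-')

theorem tcFrom_ge (s : List Char) (i : Nat) (h : s.length ≤ i + 1) : tcFrom s i = 0 := by
  have ht : (s.drop i).tail = [] := by
    have : (s.drop i).tail.length = 0 := by simp; omega
    exact List.eq_nil_of_length_eq_zero this
  simp [tcFrom, ht]

theorem tcFrom_step (s : List Char) (i : Nat) (h : i + 1 < s.length) :
    tcFrom s i = (if s[i] = '-' ∧ s[i+1] ≠ '-' then 1 else 0) + tcFrom s (i+1) := by
  have h1 : i < s.length := by omega
  have e1 : s.drop i = s[i] :: s.drop (i+1) := List.drop_eq_getElem_cons h1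
  have e2 : s.drop (i+1) = s[i+1] :: s.drop (i+2) := List.drop_eq_getElem_cons h
  rw [tcFrom, tcFrom, e1]
  rw [show (s[i] :: s.drop (i+1)).tail = s.drop (i+1) from rfl]
  conv_lhs => rw [e2]
  rw [show ((s[i] :: s[i+1] :: s.drop (i+2)).zip (s[i+1] :: s.drop (i+2)))
      = (s[i], s[i+1]) :: ((s[i+1] :: s.drop (i+2)).zip (s.drop (i+2))) from rfl]
  rw [List.countP_cons]
  rw [e2]
  rw [show (s[i+1] :: s.drop (i+2)).tail = s.drop (i+2) from rfl]
  by_cases hc : s[i] = '-' ∧ s[i+1] ≠ '-'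
  · simp [hc.1, hc.2]; omega
  · have hb : ¬ (s[i] == '-' && s[i+1] != '-') = true := by
      simp only [Bool.and_eq_true, beq_iff_eq, bne_iff_ne, ne_eq]
      tauto
    simp [hb, hc]

theorem tcFrom_succ_of_not_trans (s : List Char) (i : Nat)
    (h : ∀ (h1 : i + 1 < s.length), ¬ (s[i]'(by omega) = '-' ∧ s[i+1]'h1 ≠ '-')) :
    tcFrom s i = tcFrom s (i+1) := by
  by_cases h1 : i + 1 < s.length
  · rw [tcFrom_step s i h1, if_neg (h h1)]; omega
  · rw [tcFrom_ge s i (by omega), tcFrom_ge s (i+1) (by omega)]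

theorem gapsInnerA_some (s : List Char) (k j : Nat) (h : gapsInnerA s k = some j) :
    k ≤ j ∧ j < s.length := by
  fun_induction gapsInnerA s k with
  | case1 k hk hne => simp at h; omega
  | case2 k hk hne ih => have := ih h; omega
  | case3 k hk => simp at h

theorem gapsInnerA_none_gap (s : List Char) (k : Nat) (hk : k < s.length)
    (h : gapsInnerA s k = none) : s[k] = '-' := by
  rw [gapsInnerA, dif_pos hk] at h
  by_cases hg : s[k] ≠ '-'
  · rw [if_pos hg] at h; simp at h
  · push Not at hg; exact hg

theorem tcFrom_inner (s : List Char) : ∀ (d i j : Nat) (hi : i < s.length), s.length - i ≤ d →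
    s[i] = '-' → gapsInnerA s (i+1) = some j → tcFrom s i = 1 + tcFrom s j := by
  intro d
  induction d with
  | zero => intro i j hi hd _ _; exact absurd hi (by omega)
  | succ d ih =>
    intro i j hi hd hg h
    rw [gapsInnerA] at h
    by_cases h1 : i + 1 < s.length
    · rw [dif_pos h1] at h
      by_cases h2 : s[i+1] ≠ '-'
      · rw [if_pos h2] at h
        have hj : j = i + 1 := by simpa using h.symm
        subst hj
        rw [tcFrom_step s i h1, if_pos ⟨hg, h2⟩]
      · rw [if_neg h2] at h
        push Not at h2
        rw [tcFrom_step s i h1, if_neg (by tauto)]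
        have := ih (i+1) j h1 (by omega) h2 h
        omega
    · rw [dif_neg h1] at h
      exact absurd h (by simp)

theorem gapsLoopA_eq (s : List Char) (fuel : Nat) : ∀ i cnt, s.length ≤ i + fuel →
    gapsLoopA s i cnt fuel = cnt + tcFrom s i := by
  induction fuel with
  | zero =>
    intro i cnt hf
    rw [gapsLoopA, tcFrom_ge s i (by omega)]
    simp
  | succ f ih =>
    intro i cnt hf
    rw [gapsLoopA]
    by_cases hi : i < s.length
    · rw [dif_pos hi]
      by_cases hg : s[i] = '-'
      · rw [if_pos hg]
        have heq : gapsInnerA s i = gapsInnerA s (i+1) := by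
          rw [gapsInnerA, dif_pos hi, if_neg (by simpa using hg)]
        cases hcase : gapsInnerA s (i+1) with
        | none =>
          rw [heq, hcase]
          show gapsLoopA s (i+1) cnt f = cnt + tcFrom s i
          have hnt : tcFrom s i = tcFrom s (i+1) := by
            apply tcFrom_succ_of_not_trans
            intro h1 hc
            exact hc.2 (gapsInnerA_none_gap s (i+1) h1 hcase)
          rw [ih (i+1) cnt (by omega), hnt]
        | some j =>
          rw [heq, hcase]
          show gapsLoopA s j (cnt+1) f = cnt + tcFrom s i
          have hj := gapsInnerA_some s (i+1) j hcase
          rw [ih j (cnt+1) (by omega), tcFrom_inner s s.length i j hi (by omega) hg hcase]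
          omega
      · rw [if_neg hg]
        rw [ih (i+1) cnt (by omega),
          tcFrom_succ_of_not_trans s i (fun _ hc => hg hc.1)]
    · rw [dif_neg hi, tcFrom_ge s i (by omega)]
      simp

theorem gmcg_eq (x : String) : getMaxConsecutiveGapsA x = getMaxConsecutiveGapsB x := by
  rw [getMaxConsecutiveGapsA, getMaxConsecutiveGapsB]
  by_cases hm : '-' ∈ x.toList
  · rw [if_pos hm, gapsLoopA_eq x.toList x.toList.length 0 0 (by omega)]
    simp [tcFrom]
  · rw [if_neg hm]
    symm
    rw [List.countP_eq_zero]
    intro p hp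
    have h1 : p.1 ∈ x.toList := (List.of_mem_zip hp).1
    have : p.1 ≠ '-' := fun h => hm (h ▸ h1)
    simp [this]

theorem foldA {α : Type} (f : α → Nat) : ∀ (t : List α) (q0 : α),
    t.foldl (fun acc p => if f p ≤ acc.1 then (f p, p) else acc) (f q0, q0)
      = (f (t.foldl (fun a p => if f p ≤ f a then p else a) q0),
         t.foldl (fun a p => if f p ≤ f a then p else a) q0) := by
  intro t
  induction t with
  | nil => intro q0; rfl
  | cons p t ih =>
    intro q0
    simp only [List.foldl_cons]
    by_cases hc : f p ≤ f q0
    · rw [if_pos hc, if_pos hc]; exact ih p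
    · rw [if_neg hc, if_neg hc]; exact ih q0

theorem pickB {α : Type} (d : α) (f : α → Nat) (l : List α) :
    ∀ (m i b : Nat), i + m ≤ l.length → b < l.length →
    l.getD ((List.range' i m).foldl
        (fun b k => if (l.map f).getD k 0 ≤ (l.map f).getD b 0 then k else b) b) d
      = ((l.drop i).take m).foldl (fun a p => if f p ≤ f a then p else a) (l.getD b d) := by
  intro m
  induction m with
  | zero => intro i b _ _; simp
  | succ m ih =>
    intro i b him hb
    have hi : i < l.length := by omega
    rw [List.range'_succ, List.foldl_cons]
    rw [List.drop_eq_getElem_cons hi, List.take_succ_cons, List.foldl_cons]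
    have hgi : (l.map f).getD i 0 = f l[i] := by
      rw [List.getD_eq_getElem (l.map f) 0 (by simpa using hi)]; simp
    have hgb : (l.map f).getD b 0 = f l[b] := by
      rw [List.getD_eq_getElem (l.map f) 0 (by simpa using hb)]; simp
    have hlb : l.getD b d = l[b] := List.getD_eq_getElem l d hb
    rw [hgi, hgb, hlb]
    by_cases hc : f l[i] ≤ f l[b]
    · rw [if_pos hc, if_pos hc]
      rw [ih (i+1) i (by omega) hi]
      rw [List.getD_eq_getElem l d hi]
    · rw [if_neg hc, if_neg hc]
      rw [ih (i+1) b (by omega) hb]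
      rw [List.getD_eq_getElem l d hb]


-- ===== VERDICT (by name: the statement is the Claim_ definition above) =====
set_option maxHeartbeats 1000000 in
theorem selectBestAlignment_spec : Claim_equal_selectBestAlignment := by
  intro alignment _ hpre
  unfold Spec_selectBestAlignment
  match alignment with
  | [] => exact absurd rfl hpre
  | h :: t =>
    have hA : selectBestAlignment (h :: t)
        = t.foldl (fun a p =>
            if getMaxConsecutiveGapsB p.1 + getMaxConsecutiveGapsB p.2
               ≤ getMaxConsecutiveGapsB a.1 + getMaxConsecutiveGapsB a.2 then p else a) h := by
      simp only [selectBestAlignment, gmcg_eq]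
      exact congrArg Prod.snd
        (foldA (fun p => getMaxConsecutiveGapsB p.1 + getMaxConsecutiveGapsB p.2) t h)
    have hB : selectBestAlignment_alt (h :: t)
        = t.foldl (fun a p =>
            if getMaxConsecutiveGapsB p.1 + getMaxConsecutiveGapsB p.2
               ≤ getMaxConsecutiveGapsB a.1 + getMaxConsecutiveGapsB a.2 then p else a) h := by
      simp only [selectBestAlignment_alt, List.length_map, List.length_cons,
        Nat.add_sub_cancel]
      rw [pickB ("", "") (fun p => getMaxConsecutiveGapsB p.1 + getMaxConsecutiveGapsB p.2)
        (h :: t) t.length 1 0 (by simp only [List.length_cons]; omega) (by simp)]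
      simp [List.take_length]
    rw [hA, hB]
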